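-- pv_equiv track=rewrite | github.com/SWARTHYPEARL/Algorithm_Study | naver_codility_#3.py | solution
-- ===== SOURCE A (Python) =====
-- def solution(A, K):
--     # n: number of nails
--     # K: number of hammering
--
--     n = len(A)
--     best = 0
--     count = 1
--     for i in range(n - K - 1):
--         if (A[i] == A[i + 1]):
--             count = count + 1
--         else:
--             #count = 0
--             count = 1
--         best = max(best, count)
--     #result = best + 1 + K
--     result = best + K
--
--     #return result
--     return result if result <= n else n
-- ===== SOURCE B (Python) =====
-- def solution(A, K):
--     n = len(A)
--     m = n - K  # active prefix length: only A[:m] can still matter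
--     breaks = [i for i in range(1, m) if A[i] != A[i - 1]]
--     bounds = [0] + breaks + [m]
--     best = max(b - a for a, b in zip(bounds, bounds[1:])) if m >= 2 else 0
--     result = best + K
--     return result if result <= n else n
-- ===== Notes on version B (the rewrite author's own statement) =====
-- stated objective: alternative
-- what changed: Replaces A's single pass with a running (best, count) counter by a boundary-index decomposition: collect the break positions of the active prefix A[:n-K], then take the maximal gap between consecutive bounds.
import Mathlib
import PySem

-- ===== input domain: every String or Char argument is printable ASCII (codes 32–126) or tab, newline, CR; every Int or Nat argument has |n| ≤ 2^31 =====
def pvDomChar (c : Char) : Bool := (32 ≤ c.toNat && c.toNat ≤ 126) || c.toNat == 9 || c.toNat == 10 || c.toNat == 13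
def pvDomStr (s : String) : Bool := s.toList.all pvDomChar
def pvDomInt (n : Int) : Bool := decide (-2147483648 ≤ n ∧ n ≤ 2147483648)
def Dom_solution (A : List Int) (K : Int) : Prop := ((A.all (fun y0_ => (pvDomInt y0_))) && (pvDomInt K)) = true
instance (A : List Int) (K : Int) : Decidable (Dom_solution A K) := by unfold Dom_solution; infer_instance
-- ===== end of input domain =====

-- B replaces A's running-counter scan by a boundary-index pass: collect the break positions
-- of the active prefix, then take the maximal gap between consecutive bounds (objective: alternative).


-- ===== PORT A =====
-- one loop iteration of A: update (best, count) at pair (i, i+1)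
-- (pyGetD: Pre_solution keeps every accessed index in range; Python raises outside Pre_)
def solStep (A : List Int) (s : Int × Int) (i : Int) : Int × Int :=
  let count := if PySem.List.pyGetD A i 0 == PySem.List.pyGetD A (i + 1) 0 then s.2 + 1 else 1
  (max s.1 count, count)

def solution (A : List Int) (K : Int) : Int :=
  let n : Int := A.length
  let st := (PySem.List.pyRange 0 (n - K - 1)).foldl (solStep A) (0, 1)
  let result := st.1 + K
  if result ≤ n then result else n

-- ===== PORT B =====
-- A[i] != A[i-1]  (pyGetD: Pre_solution keeps every accessed index in range)
def isBreak (A : List Int) (i : Int) : Bool :=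
  PySem.List.pyGetD A i 0 != PySem.List.pyGetD A (i - 1) 0

def solution_alt (A : List Int) (K : Int) : Int :=
  let n : Int := A.length
  let m := n - K
  let breaks := (PySem.List.pyRange 1 m).filter (isBreak A)
  let bounds := 0 :: (breaks ++ [m])
  let best :=
    if 2 ≤ m then
      (PySem.List.max? ((bounds.zip (PySem.List.slice bounds (some 1) none)).map
        (fun p => p.2 - p.1)) id).getD 0
    else 0
  let result := best + K
  if result ≤ n then result else n

-- ===== PRECONDITION & SPEC =====
-- Pre_ excludes exactly the inputs on which Python A raises IndexError:
-- K < 0 makes A read A[i+1] past the end (unless the loop range is already empty).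
def Pre_solution (A : List Int) (K : Int) : Prop :=
  0 ≤ K ∨ (A.length : Int) - K - 1 ≤ 0
instance (A : List Int) (K : Int) : Decidable (Pre_solution A K) := by
  unfold Pre_solution; infer_instance

def pvWitness_solution : List Int × Int := ([1, 1, 2, 2, 2], 1)

def Spec_solution (A : List Int) (K : Int) (out : Int) : Prop := out = solution_alt A K
instance (A : List Int) (K : Int) (out : Int) : Decidable (Spec_solution A K out) := by
  unfold Spec_solution; infer_instance

-- ===== CLAIM (what is proved, stated in full; the proofs are below) =====
def Claim_equal_solution : Prop :=
  ∀ (A : List Int) (K : Int), Dom_solution A K → Pre_solution A K →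
    Spec_solution A K (solution A K)

-- ===== LEMMAS AND PROOFS =====

-- last element of a bounds chain (chains are nonempty; [] case unused)
def lastI : List Int → Int
  | [] => 0
  | [a] => a
  | _ :: b :: r => lastI (b :: r)

-- maximal gap of the chain c closed by the final bound e
def mgap : List Int → Int → Int
  | [], _ => 0
  | [a], e => e - a
  | a :: b :: r, e => max (b - a) (mgap (b :: r) e)

-- the chain of bounds of the prefix A[0..t]: 0 plus all break positions in [1, t]
def chainI (A : List Int) (t : Int) : List Int :=
  0 :: (PySem.List.pyRange 1 (t + 1)).filter (isBreak A)

def gapsOf (l : List Int) : List Int := (l.zip l.tail).map (fun p => p.2 - p.1)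

def gmax : List Int → Int
  | [] => 0
  | x :: xs => xs.foldl max x

theorem lastI_append (c : List Int) (x : Int) : lastI (c ++ [x]) = x := by
  induction c with
  | nil => rfl
  | cons a c ih =>
    cases c with
    | nil => rfl
    | cons b r => simpa [lastI] using ih

theorem mgap_append (c : List Int) (hc : c ≠ []) (x e : Int) :
    mgap (c ++ [x]) e = max (mgap c x) (e - x) := by
  induction c with
  | nil => exact absurd rfl hc
  | cons a c ih =>
    cases c with
    | nil => simp [mgap]
    | cons b r =>
      have := ih (by simp)
      simp only [List.cons_append, mgap] at this ⊢
      rw [this, max_assoc]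

theorem mgap_succ (c : List Int) (hc : c ≠ []) (e : Int) :
    mgap c (e + 1) = max (mgap c e) (e + 1 - lastI c) := by
  induction c with
  | nil => exact absurd rfl hc
  | cons a c ih =>
    cases c with
    | nil =>
      simp only [mgap, lastI]
      omega
    | cons b r =>
      have := ih (by simp)
      simp only [mgap, lastI] at this ⊢
      rw [this, max_assoc]

theorem foldl_max_assoc (ys : List Int) (x y : Int) :
    ys.foldl max (max x y) = max x (ys.foldl max y) := by
  induction ys generalizing y with
  | nil => rfl
  | cons z ys ih => simp only [List.foldl, max_assoc, ih]

theorem gmax_cons (x : Int) (l : List Int) (hl : l ≠ []) :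
    gmax (x :: l) = max x (gmax l) := by
  cases l with
  | nil => exact absurd rfl hl
  | cons y ys => simpa [gmax] using foldl_max_assoc ys x y

theorem max?_step (x y : Int) (ys : List Int) :
    PySem.List.max? (x :: y :: ys) (id : Int → Int) = PySem.List.max? (max x y :: ys) id := by
  simp only [PySem.List.max?, List.foldl, id]
  congr 1
  by_cases h : x < y
  · simp [h, max_eq_right (le_of_lt h)]
  · simp [h, max_eq_left (not_lt.mp h)]

theorem max?_getD_eq_gmax (xs : List Int) : (PySem.List.max? xs id).getD 0 = gmax xs := by
  cases xs with
  | nil => rfl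
  | cons x xs =>
    induction xs generalizing x with
    | nil => rfl
    | cons y ys ih => rw [max?_step, ih (max x y)]; rfl

theorem gapsOf_cons_ne_nil (x e : Int) (l : List Int) : gapsOf (x :: l ++ [e]) ≠ [] := by
  cases l <;> simp [gapsOf]

theorem gmax_gapsOf (c : List Int) (hc : c ≠ []) (e : Int) :
    gmax (gapsOf (c ++ [e])) = mgap c e := by
  induction c with
  | nil => exact absurd rfl hc
  | cons a c ih =>
    cases c with
    | nil => simp [gapsOf, gmax, mgap]
    | cons b r =>
      have h1 : gapsOf ((a :: b :: r) ++ [e]) = (b - a) :: gapsOf ((b :: r) ++ [e]) := rfl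
      rw [h1, gmax_cons _ _ (gapsOf_cons_ne_nil b e r), ih (by simp)]
      rfl

theorem chainI_ne_nil (A : List Int) (t : Int) : chainI A t ≠ [] := by
  simp [chainI]

-- A's loop invariant: after scanning the pairs of A[0..t],
-- best = maximal gap of the chain of A[0..t] and count = length of its last run.
theorem loop_inv (A : List Int) (t : Nat) (ht : 1 ≤ t) :
    (PySem.List.pyRange 0 (t : Int)).foldl (solStep A) (0, 1)
      = (mgap (chainI A (t : Int)) ((t : Int) + 1), (t : Int) + 1 - lastI (chainI A (t : Int))) := by
  induction t with
  | zero => omega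
  | succ t ih =>
    rcases Nat.lt_or_ge t 1 with h1 | h1
    · -- base case t+1 = 1
      interval_cases t
      have hr : PySem.List.pyRange 0 ((0 + 1 : Nat) : Int) = [0] := by decide
      have hc : chainI A ((0 + 1 : Nat) : Int) = 0 :: (List.filter (isBreak A) [1]) := by
        rw [chainI]
        rw [show (((0 + 1 : Nat) : Int) + 1) = (2 : Int) from by norm_num,
            show (PySem.List.pyRange 1 (2 : Int)) = [1] from by decide]
      have hone : ((0 + 1 : Nat) : Int) = 1 := by norm_num
      rw [hr, hc, hone]
      by_cases hb : isBreak A 1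
      · have hprop : ¬ PySem.List.pyGetD A 0 0 = PySem.List.pyGetD A 1 0 := by
          have h := hb
          simp only [isBreak] at h
          norm_num at h
          omega
        simp [solStep, hb, mgap, lastI, hprop]
      · have hprop : PySem.List.pyGetD A 0 0 = PySem.List.pyGetD A 1 0 := by
          have h := hb
          simp only [isBreak] at h
          norm_num at h
          omega
        simp [solStep, hb, mgap, lastI, hprop]
    · -- inductive step, t ≥ 1
      have hrange : PySem.List.pyRange 0 ((t : Int) + 1)
          = PySem.List.pyRange 0 (t : Int) ++ [(t : Int)] :=
        PySem.List.pyRange_one_succ_right (by exact_mod_cast Nat.zero_le t)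
      have hbrk : PySem.List.pyRange 1 ((t : Int) + 1 + 1)
          = PySem.List.pyRange 1 ((t : Int) + 1) ++ [(t : Int) + 1] :=
        PySem.List.pyRange_one_succ_right (by exact_mod_cast Nat.succ_le_succ (Nat.zero_le t))
      have hchain : chainI A ((t : Int) + 1)
          = chainI A (t : Int) ++ (if isBreak A ((t : Int) + 1) then [(t : Int) + 1] else []) := by
        simp only [chainI, hbrk, List.filter_append, List.cons_append]
        by_cases hb : isBreak A ((t : Int) + 1) <;> simp [hb, List.filter]
      have hcast : ((t + 1 : Nat) : Int) = (t : Int) + 1 := by push_cast; ring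
      rw [hcast, hrange, List.foldl_concat, ih h1, hchain]
      by_cases hb : isBreak A ((t : Int) + 1)
      · -- a break at t+1: count resets to 1, chain grows
        have hne : (PySem.List.pyGetD A (t : Int) 0 == PySem.List.pyGetD A ((t : Int) + 1) 0) = false := by
          have h := hb
          simp only [isBreak, add_sub_cancel_right, bne_iff_ne, ne_eq] at h
          simp only [beq_eq_false_iff_ne, ne_eq]
          omega
        rw [if_pos hb, mgap_append _ (chainI_ne_nil A (t : Int)), lastI_append]
        have h2 : (t : Int) + 1 + 1 - ((t : Int) + 1) = 1 := by ring
        rw [h2]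
        simp only [solStep, hne, Bool.false_eq_true, if_false]
      · -- no break: count grows, chain unchanged
        have heq : (PySem.List.pyGetD A (t : Int) 0 == PySem.List.pyGetD A ((t : Int) + 1) 0) = true := by
          have h := hb
          simp only [isBreak, add_sub_cancel_right, bne_iff_ne, ne_eq, not_not] at h
          simp only [beq_iff_eq]
          omega
        rw [if_neg hb, List.append_nil, mgap_succ _ (chainI_ne_nil A (t : Int)) ((t : Int) + 1)]
        simp only [solStep, heq, if_true]
        have h3 : (t : Int) + 1 - lastI (chainI A (t : Int)) + 1
            = (t : Int) + 1 + 1 - lastI (chainI A (t : Int)) := by ring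
        rw [h3]

-- ===== VERDICT (by name: the statement is the Claim_ definition above) =====
theorem solution_spec : Claim_equal_solution := by
  intro A K _hdom hpre
  unfold Spec_solution solution solution_alt
  simp only
  by_cases hm : 2 ≤ (A.length : Int) - K
  · -- active prefix has length ≥ 2
    have hK : 0 ≤ K := by
      rcases hpre with h | h
      · exact h
      · omega
    set n : Int := (A.length : Int) with hn
    set m : Int := n - K with hmdef
    obtain ⟨t, ht⟩ : ∃ t : Nat, (t : Int) = m - 1 := ⟨(m - 1).toNat, by omega⟩
    have ht1 : 1 ≤ t := by omega
    have h1 : n - K - 1 = (t : Int) := by omega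
    rw [h1, loop_inv A t ht1]
    have h2 : (t : Int) + 1 = m := by omega
    rw [if_pos hm, PySem.List.slice_from_one, max?_getD_eq_gmax]
    have hchain : chainI A (t : Int) = 0 :: (PySem.List.pyRange 1 m).filter (isBreak A) := by
      simp [chainI, h2]
    have hb : (0 :: ((PySem.List.pyRange 1 m).filter (isBreak A) ++ [m]))
        = chainI A (t : Int) ++ [m] := by simp [hchain]
    rw [hb]
    have : gmax (gapsOf (chainI A (t : Int) ++ [m])) = mgap (chainI A (t : Int)) m :=
      gmax_gapsOf _ (chainI_ne_nil A (t : Int)) m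
    simp only [gapsOf] at this
    rw [this, h2]
  · -- degenerate prefix: both loops are empty / best = 0
    have hempty : PySem.List.pyRange 0 ((A.length : Int) - K - 1) = [] :=
      PySem.List.pyRange_one_eq_nil (by omega)
    rw [hempty, if_neg hm]
    simp
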